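-- pv_equiv track=rewrite | github.com/nwleedev/engine | plugins/session-memory/scripts/narration_pipeline.py | _extract_delta
-- ===== SOURCE A (Python) =====
-- def _extract_delta(messages, last_uuid):
--     if not last_uuid:
--         return messages
--     found = False
--     delta = []
--     for m in messages:
--         if found:
--             delta.append(m)
--         if m.get("uuid") == last_uuid:
--             found = True
--     return delta if found else messages
-- ===== SOURCE B (Python) =====
-- def _extract_delta(messages, last_uuid):
--     if not last_uuid:
--         return messages
--     for i, m in enumerate(messages):
--         if m.get("uuid") == last_uuid:
--             return list(messages[i+1:])
--     return messages
-- ===== Notes on version B (the rewrite author's own statement) =====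
-- stated objective: simpler
-- what changed: Replaces the flag+accumulator full traversal with a find-first-match-then-tail-slice decomposition that returns early at the first matching uuid.
import Mathlib
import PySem

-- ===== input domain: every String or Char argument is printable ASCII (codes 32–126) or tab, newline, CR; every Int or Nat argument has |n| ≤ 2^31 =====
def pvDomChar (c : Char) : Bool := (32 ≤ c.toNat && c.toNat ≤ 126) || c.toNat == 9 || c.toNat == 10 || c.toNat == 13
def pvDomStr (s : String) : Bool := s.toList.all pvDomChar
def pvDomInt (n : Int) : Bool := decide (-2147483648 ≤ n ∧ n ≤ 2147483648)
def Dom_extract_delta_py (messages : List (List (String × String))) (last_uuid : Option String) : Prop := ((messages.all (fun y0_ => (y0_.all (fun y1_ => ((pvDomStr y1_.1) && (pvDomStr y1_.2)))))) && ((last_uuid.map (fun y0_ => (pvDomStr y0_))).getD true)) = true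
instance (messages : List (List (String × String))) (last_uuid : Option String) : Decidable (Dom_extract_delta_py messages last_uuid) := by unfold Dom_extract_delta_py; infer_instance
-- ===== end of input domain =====

-- B replaces A's flag+accumulator full traversal by find-first-match then tail slice (simpler decomposition, same linear cost).

-- ===== PORT A =====
-- `if not last_uuid` is true for None and for the empty string.
-- m.get("uuid"): first-match association-list lookup (List.lookup).
-- Loop body of A's for-loop, named so the fold is readable.
def pvStep (u : String) (st : Bool × List (List (String × String))) (m : List (String × String)) : Bool × List (List (String × String)) :=
  let delta := if st.1 then st.2 ++ [m] else st.2
  let found := if m.lookup "uuid" = some u then true else st.1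
  (found, delta)

def extract_delta_py (messages : List (List (String × String))) (last_uuid : Option String) : List (List (String × String)) :=
  match last_uuid with
  | none => messages
  | some u =>
    if u = "" then messages
    else
      let st := messages.foldl (pvStep u) (false, [])
      if st.1 then st.2 else messages

-- ===== PORT B =====
def extract_delta_py_alt (messages : List (List (String × String))) (last_uuid : Option String) : List (List (String × String)) :=
  match last_uuid with
  | none => messages
  | some u =>
    if u = "" then messages
    else
      match messages.findIdx? (fun m => m.lookup "uuid" = some u) with
      | some i => messages.drop (i + 1)
      | none => messages

-- ===== PRECONDITION & SPEC =====
def Spec_extract_delta_py (messages : List (List (String × String))) (last_uuid : Option String) (out : List (List (String × String))) : Prop := out = extract_delta_py_alt messages last_uuid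
instance (messages : List (List (String × String))) (last_uuid : Option String) (out : List (List (String × String))) : Decidable (Spec_extract_delta_py messages last_uuid out) := by unfold Spec_extract_delta_py; infer_instance

-- ===== CLAIM (what is proved, stated in full; the proofs are below) =====
def Claim_equal_extract_delta_py : Prop := ∀ (messages : List (List (String × String))) (last_uuid : Option String), Dom_extract_delta_py messages last_uuid → Spec_extract_delta_py messages last_uuid (extract_delta_py messages last_uuid)

-- ===== LEMMAS AND PROOFS =====

-- Once the flag is set, A's fold appends every remaining message.
theorem foldl_found_true (u : String) (ms : List (List (String × String)))
    (delta : List (List (String × String))) :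
    ms.foldl (pvStep u) (true, delta) = (true, delta ++ ms) := by
  induction ms generalizing delta with
  | nil => simp
  | cons m ms ih =>
    rw [List.foldl_cons, show pvStep u (true, delta) m = (true, delta ++ [m]) from by
      simp [pvStep], ih]
    simp

-- The flag after the fold records whether any message matched.
theorem fst_foldl (u : String) (ms : List (List (String × String)))
    (b : Bool) (delta : List (List (String × String))) :
    (ms.foldl (pvStep u) (b, delta)).1 = (b || ms.any (fun m => m.lookup "uuid" = some u)) := by
  induction ms generalizing b delta with
  | nil => simp
  | cons m ms ih =>
    rw [List.foldl_cons]
    by_cases h : m.lookup "uuid" = some u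
    · rw [show pvStep u (b, delta) m = (true, if b then delta ++ [m] else delta) from by
        simp [pvStep, h]]
      simp [ih, h]
    · rw [show pvStep u (b, delta) m = (b, if b then delta ++ [m] else delta) from by
        simp [pvStep, h]]
      simp [ih, h]

-- Main correspondence between A's fold and B's findIdx?-then-drop.
theorem fold_vs_find (u : String) (ms : List (List (String × String))) :
    (if (ms.foldl (pvStep u) (false, [])).1
     then (ms.foldl (pvStep u) (false, [])).2
     else ms) =
    (match ms.findIdx? (fun m => m.lookup "uuid" = some u) with
     | some i => ms.drop (i + 1)
     | none => ms) := by
  induction ms with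
  | nil => simp
  | cons m ms ih =>
    by_cases h : m.lookup "uuid" = some u
    · rw [List.foldl_cons, show pvStep u (false, []) m = (true, []) from by simp [pvStep, h],
        foldl_found_true]
      simp [List.findIdx?_cons, h]
    · rw [List.foldl_cons, show pvStep u (false, ([] : List (List (String × String)))) m
          = (false, []) from by simp [pvStep, h]]
      rcases hfind : ms.findIdx? (fun m => m.lookup "uuid" = some u) with _ | i
      · -- no later match: the fold's flag is false, both sides return the whole list
        have hflag : (ms.foldl (pvStep u) (false, [])).1 = false := by
          rw [fst_foldl]
          simpa [List.findIdx?_eq_none_iff] using hfind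
        simp [List.findIdx?_cons, h, hfind, hflag]
      · -- a later match at i: drop indices shift by one
        have hcons : (m :: ms).findIdx? (fun m => m.lookup "uuid" = some u) = some (i + 1) := by
          simp [List.findIdx?_cons, h, hfind]
        have hflag : (ms.foldl (pvStep u) (false, [])).1 = true := by
          rw [fst_foldl]
          rcases List.findIdx?_eq_some_iff_getElem.mp hfind with ⟨hlt, hp, _⟩
          simp only [Bool.false_or, List.any_eq_true]
          exact ⟨ms[i], List.getElem_mem hlt, by simpa using hp⟩
        rw [hfind] at ih
        rw [if_pos hflag] at ih
        simp only [hcons]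
        rw [if_pos hflag, ih]
        rfl

-- ===== VERDICT (by name: the statement is the Claim_ definition above) =====
theorem extract_delta_py_spec : Claim_equal_extract_delta_py := by
  intro messages last_uuid _
  unfold Spec_extract_delta_py extract_delta_py extract_delta_py_alt
  match last_uuid with
  | none => rfl
  | some u =>
    by_cases hu : u = ""
    · simp [hu]
    · simp only [if_neg hu]
      exact fold_vs_find u messages
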